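-- pv_equiv track=rewrite | github.com/723poil/coding-test-study | week1/09.상어 초등학교/상어_초등학교_이상협.py | find_max_empty_seats
-- ===== SOURCE A (Python) =====
-- def find_max_empty_seats(able_seats:list, seats: list):
--
--     max_s = seats[able_seats[0][0]][able_seats[0][1]][1]
--     likes = [able_seats[0]]
--
--     for able in able_seats[1:]:
--         r = able[0]
--         c = able[1]
--
--         if max_s == seats[r][c][1]:
--             likes.append(able)
--         elif max_s < seats[r][c][1]:
--             likes = [able]
--             max_s = seats[r][c][1]
--
--     return likes
-- ===== SOURCE B (Python) =====
-- def find_max_empty_seats(able_seats: list, seats: list):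
--     max_s = max(seats[r][c][1] for r, c in able_seats)
--     return [a for a in able_seats if seats[a[0]][a[1]][1] == max_s]
-- ===== Notes on version B (the rewrite author's own statement) =====
-- stated objective: simpler
-- what changed: Replaces the interleaved running-max-with-reset accumulator loop by two clean passes: compute the maximum adjacency score with max(), then filter the seats that attain it.
-- outside the precondition, e.g. on find_max_empty_seats([], []): A raises IndexError, B raises ValueError; on find_max_empty_seats([(0, 5)], [[(1, 2)]]): A raises IndexError, B raises IndexError
import Mathlib
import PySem

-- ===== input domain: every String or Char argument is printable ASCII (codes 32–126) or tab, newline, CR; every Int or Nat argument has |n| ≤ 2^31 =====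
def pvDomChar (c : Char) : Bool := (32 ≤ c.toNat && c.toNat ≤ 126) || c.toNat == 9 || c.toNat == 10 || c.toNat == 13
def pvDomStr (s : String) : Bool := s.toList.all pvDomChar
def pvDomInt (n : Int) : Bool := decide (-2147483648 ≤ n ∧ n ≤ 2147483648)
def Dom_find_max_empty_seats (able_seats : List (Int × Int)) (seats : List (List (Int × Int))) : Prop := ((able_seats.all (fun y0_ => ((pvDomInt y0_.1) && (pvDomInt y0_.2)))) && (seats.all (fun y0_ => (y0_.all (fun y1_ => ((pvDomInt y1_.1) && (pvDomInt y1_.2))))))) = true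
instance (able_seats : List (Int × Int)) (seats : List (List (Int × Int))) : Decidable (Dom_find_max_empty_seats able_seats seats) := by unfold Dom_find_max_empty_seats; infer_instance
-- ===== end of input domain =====

-- B replaces A's interleaved running-max-with-reset loop by two passes: take the max score, then filter the seats attaining it (objective: simpler).


-- shared accessor: seats[r][c][1] (none = IndexError; both Pythons index identically)
def pvScore (seats : List (List (Int × Int))) (a : Int × Int) : Option Int :=
  (PySem.List.pyGet? seats a.1).bind (fun row => (PySem.List.pyGet? row a.2).map Prod.snd)

-- ===== PORT A =====
-- literal transliteration of A: seed with first able seat, then run the running-max/reset loop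
-- (the [] branch and getD 0 are unreachable under Pre_: Python raises IndexError there)
def find_max_empty_seats (able_seats : List (Int × Int)) (seats : List (List (Int × Int))) : List (Int × Int) :=
  match able_seats with
  | [] => []
  | a0 :: rest =>
    (rest.foldl (fun st able =>
        if st.1 == (pvScore seats able).getD 0 then (st.1, st.2 ++ [able])
        else if st.1 < (pvScore seats able).getD 0 then ((pvScore seats able).getD 0, [able])
        else st)
      ((pvScore seats a0).getD 0, [a0])).2

-- ===== PORT B =====
-- transliteration of Source B: max over the scores, then one filter pass
def find_max_empty_seats_alt (able_seats : List (Int × Int)) (seats : List (List (Int × Int))) : List (Int × Int) :=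
  match PySem.List.max? (able_seats.map (fun a => (pvScore seats a).getD 0)) (fun y => y) with
  | none => []   -- empty able_seats: Python raises ValueError (outside Pre_)
  | some max_s => able_seats.filter (fun a => (pvScore seats a).getD 0 == max_s)

-- ===== PRECONDITION & SPEC =====
-- Pre_: able_seats is nonempty and every listed seat indexes seats in range (else both Pythons raise)
def Pre_find_max_empty_seats (able_seats : List (Int × Int)) (seats : List (List (Int × Int))) : Prop :=
  able_seats ≠ [] ∧ able_seats.all (fun a => (pvScore seats a).isSome) = true
instance (able_seats : List (Int × Int)) (seats : List (List (Int × Int))) : Decidable (Pre_find_max_empty_seats able_seats seats) := by unfold Pre_find_max_empty_seats; infer_instance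
def pvWitness_find_max_empty_seats : (List (Int × Int)) × (List (List (Int × Int))) := ([((0 : Int), (0 : Int))], [[((1 : Int), (2 : Int))]])
def Spec_find_max_empty_seats (able_seats : List (Int × Int)) (seats : List (List (Int × Int))) (out : List (Int × Int)) : Prop := out = find_max_empty_seats_alt able_seats seats
instance (able_seats : List (Int × Int)) (seats : List (List (Int × Int))) (out : List (Int × Int)) : Decidable (Spec_find_max_empty_seats able_seats seats out) := by unfold Spec_find_max_empty_seats; infer_instance

-- ===== CLAIM (what is proved, stated in full; the proofs are below) =====
def Claim_equal_find_max_empty_seats : Prop := ∀ (able_seats : List (Int × Int)) (seats : List (List (Int × Int))), Dom_find_max_empty_seats able_seats seats → Pre_find_max_empty_seats able_seats seats → Spec_find_max_empty_seats able_seats seats (find_max_empty_seats able_seats seats)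

-- ===== LEMMAS AND PROOFS =====

-- invariant of A's loop: from state (ms, likes) it ends at the running max M of ms and the
-- scores of rest, with likes kept iff ms = M, followed by the rest-elements scoring exactly M
theorem pvLoopA (f : Int × Int → Int) :
    ∀ (rest : List (Int × Int)) (ms : Int) (likes : List (Int × Int)),
    (rest.foldl (fun st able =>
        if st.1 == f able then (st.1, st.2 ++ [able])
        else if st.1 < f able then (f able, [able])
        else st)
      (ms, likes))
    = (rest.foldl (fun m x => max m (f x)) ms,
       (if ms = rest.foldl (fun m x => max m (f x)) ms then likes else [])
         ++ rest.filter (fun x => f x == rest.foldl (fun m x => max m (f x)) ms)) := by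
  intro rest
  induction rest with
  | nil => intro ms likes; simp
  | cons x t ih =>
    intro ms likes
    simp only [List.foldl_cons, List.filter_cons]
    by_cases h1 : ms = f x
    · rw [if_pos (by simpa using h1.symm ▸ rfl)]
      rw [ih]
      have hmax : max ms (f x) = ms := by omega
      simp only [hmax]
      by_cases h2 : ms = t.foldl (fun m y => max m (f y)) ms
      · have hfx : (f x == t.foldl (fun m y => max m (f y)) ms) = true := by
          simp [← h1, ← h2]
        rw [if_pos h2, if_pos h2, if_pos hfx]
        simp
      · have hfx : ¬ ((f x == t.foldl (fun m y => max m (f y)) ms) = true) := by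
          simp [← h1]; exact fun hq => h2 (h1.symm ▸ hq)
        rw [if_neg h2, if_neg h2, if_neg hfx]
    · rw [if_neg (by simpa using h1)]
      by_cases h2 : ms < f x
      · rw [if_pos (by simpa using h2)]
        rw [ih]
        have hmax : max ms (f x) = f x := by omega
        simp only [hmax]
        have hle := (PySem.List.le_foldl_max_int t f (f x)).1
        have hne : ¬ ms = t.foldl (fun m y => max m (f y)) (f x) := by omega
        rw [if_neg hne]
        by_cases hx : f x = t.foldl (fun m y => max m (f y)) (f x)
        · rw [if_pos hx, if_pos (by simpa using hx)]
          simp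
        · rw [if_neg hx, if_neg (by simpa using hx)]
      · rw [if_neg (by simpa using h2)]
        rw [ih]
        have hmax : max ms (f x) = ms := by omega
        simp only [hmax]
        have hle := (PySem.List.le_foldl_max_int t f ms).1
        have hfx : ¬ ((f x == t.foldl (fun m y => max m (f y)) ms) = true) := by
          simp; omega
        rw [if_neg hfx]

-- ===== VERDICT (by name: the statement is the Claim_ definition above) =====
theorem find_max_empty_seats_spec : Claim_equal_find_max_empty_seats := by
  intro able_seats seats _ hpre
  obtain ⟨hne, _⟩ := hpre
  unfold Spec_find_max_empty_seats
  match able_seats, hne with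
  | a0 :: rest, _ =>
    simp only [find_max_empty_seats, find_max_empty_seats_alt, List.map_cons,
      PySem.List.max?_id_cons, List.foldl_map]
    rw [pvLoopA]
    simp only [List.filter_cons]
    by_cases h : (pvScore seats a0).getD 0
        = List.foldl (fun m x => max m ((pvScore seats x).getD 0)) ((pvScore seats a0).getD 0) rest
    · rw [if_pos h, if_pos (by simpa using h)]
      simp
    · rw [if_neg h, if_neg (by simpa using h)]
      simp
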